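-- pv_equiv track=rewrite | github.com/Star-Viper/Viper-Cipher | dicipher.py | create_matrix_from_cipher
-- ===== SOURCE A (Python) =====
-- import math
--
-- def create_matrix_from_cipher(ciphertext):
--     # Calculate the number of rows needed for the matrix
--     rows = math.ceil(len(ciphertext) / 3)
--
--     # Create an empty matrix
--     matrix = [['' for _ in range(3)] for _ in range(rows)]
--
--     # Start filling the matrix from the last of the first row
--     index = 0
--     for j in range(2, -1, -1):
--         if j % 2 == 0:
--             for i in range(rows):
--                 if index < len(ciphertext):
--                     matrix[i][j] = ciphertext[index]
--                     index += 1
--         else: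
--             for i in range(rows - 1, -1, -1):
--                 if index < len(ciphertext):
--                     matrix[i][j] = ciphertext[index]
--                     index += 1
--
--     return matrix
-- ===== SOURCE B (Python) =====
-- def create_matrix_from_cipher(ciphertext):
--     n = len(ciphertext)
--     rows = -(-n // 3)  # ceil(n/3)
--     matrix = [['' for _ in range(3)] for _ in range(rows)]
--     for index in range(n):
--         block, pos = divmod(index, rows)
--         col = 2 - block
--         row = pos if block % 2 == 0 else rows - 1 - pos
--         matrix[row][col] = ciphertext[index]
--     return matrix
-- ===== Notes on version B (the rewrite author's own statement) =====
-- stated objective: alternative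
-- what changed: Replaces the three column-wise boustrophedon nested loops with guarded index bookkeeping by a single arithmetic pass over the character indices, computing each character's (row, col) cell from index // rows and index % rows.
import Mathlib
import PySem

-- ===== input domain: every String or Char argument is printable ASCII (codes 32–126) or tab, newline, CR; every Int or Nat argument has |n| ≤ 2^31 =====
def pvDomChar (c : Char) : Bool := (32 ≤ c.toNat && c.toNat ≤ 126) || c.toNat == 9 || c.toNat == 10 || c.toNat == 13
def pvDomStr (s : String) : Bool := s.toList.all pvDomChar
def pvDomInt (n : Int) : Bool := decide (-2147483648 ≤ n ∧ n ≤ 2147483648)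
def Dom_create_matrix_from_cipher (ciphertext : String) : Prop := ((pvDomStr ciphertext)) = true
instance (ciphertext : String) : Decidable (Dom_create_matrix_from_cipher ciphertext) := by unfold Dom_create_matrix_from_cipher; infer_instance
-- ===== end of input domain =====

-- B replaces A's three boustrophedon column loops (with a guarded running index) by one
-- arithmetic pass over the character indices; objective: alternative decomposition, same O(n).

-- ===== PORT A =====
-- matrix[i][j] = c  (both programs only write in-range cells)
def pvSetCell (m : List (List String)) (i j : Nat) (c : String) : List (List String) :=
  m.set i ((m.getD i []).set j c)

def create_matrix_from_cipher (ciphertext : String) : List (List String) :=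
  let cs := ciphertext.toList
  let n := cs.length
  -- math.ceil(len(ciphertext) / 3): exact on a Nat length
  let rows := (n + 2) / 3
  -- body of both inner loops: guarded write of ciphertext[index], then index += 1
  let step : (List (List String) × Nat) → Nat → Nat → (List (List String) × Nat) :=
    fun st i j =>
      if st.2 < n then (pvSetCell st.1 i j (String.ofList [cs.getD st.2 ' ']), st.2 + 1) else st
  -- for j in range(2,-1,-1) = [2,1,0]; range(rows) forward, range(rows-1,-1,-1) = reverse
  (([2, 1, 0] : List Nat).foldl (fun st j =>
      if j % 2 == 0 then (List.range rows).foldl (fun st i => step st i j) st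
      else (List.range rows).reverse.foldl (fun st i => step st i j) st)
    (List.replicate rows (List.replicate 3 ""), 0)).1

-- ===== PORT B =====
def create_matrix_from_cipher_alt (ciphertext : String) : List (List String) :=
  let cs := ciphertext.toList
  let n := cs.length
  let rows := (n + 2) / 3   -- -(-n // 3)
  (List.range n).foldl (fun m index =>
    let block := index / rows
    let pos := index % rows
    let col := 2 - block
    let row := if block % 2 == 0 then pos else rows - 1 - pos
    pvSetCell m row col (String.ofList [cs.getD index ' '])) (List.replicate rows (List.replicate 3 ""))

-- ===== PRECONDITION & SPEC =====
def Spec_create_matrix_from_cipher (ciphertext : String) (out : List (List String)) : Prop := out = create_matrix_from_cipher_alt ciphertext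
instance (ciphertext : String) (out : List (List String)) : Decidable (Spec_create_matrix_from_cipher ciphertext out) := by unfold Spec_create_matrix_from_cipher; infer_instance

-- ===== CLAIM (what is proved, stated in full; the proofs are below) =====
def Claim_equal_create_matrix_from_cipher : Prop := ∀ (ciphertext : String), Dom_create_matrix_from_cipher ciphertext → Spec_create_matrix_from_cipher ciphertext (create_matrix_from_cipher ciphertext)

-- ===== LEMMAS AND PROOFS =====

-- A's guarded write-step, over (row, col) pairs
def pvG (cs : List Char) (st : List (List String) × Nat) (p : Nat × Nat) :
    List (List String) × Nat :=
  if st.2 < cs.length then (pvSetCell st.1 p.1 p.2 (String.ofList [cs.getD st.2 ' ']), st.2 + 1)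
  else st

-- the same step without the guard
def pvH (cs : List Char) (st : List (List String) × Nat) (p : Nat × Nat) :
    List (List String) × Nat :=
  (pvSetCell st.1 p.1 p.2 (String.ofList [cs.getD st.2 ' ']), st.2 + 1)

-- the cell that receives the k-th character (B's arithmetic)
def pvSeq (rows k : Nat) : Nat × Nat :=
  (if (k / rows) % 2 == 0 then k % rows else rows - 1 - k % rows, 2 - k / rows)

-- A's full visiting order of cells
def pvP (rows : Nat) : List (Nat × Nat) :=
  (List.range rows).map (fun i => (i, 2)) ++ (List.range rows).reverse.map (fun i => (i, 1))
    ++ (List.range rows).map (fun i => (i, 0))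

theorem pvP_length (rows : Nat) : (pvP rows).length = 3 * rows := by
  simp [pvP]; omega

theorem pvP_getElem (rows k : Nat) (h : k < (pvP rows).length) :
    (pvP rows)[k] = pvSeq rows k := by
  rw [pvP_length] at h
  unfold pvP pvSeq
  rcases Nat.lt_or_ge k rows with h1 | h1
  · have hd : k / rows = 0 := Nat.div_eq_of_lt h1
    have hm : k % rows = k := Nat.mod_eq_of_lt h1
    simp only [List.getElem_append, List.length_append, List.length_map, List.length_reverse,
      List.length_range, List.getElem_map, List.getElem_reverse, List.getElem_range, hd, hm]
    split_ifs <;> (simp_all; try omega)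
  · have hr : 0 < rows := by omega
    rcases Nat.lt_or_ge k (2 * rows) with h2 | h2
    · have hd : k / rows = 1 := by apply Nat.div_eq_of_lt_le <;> omega
      have hm : k % rows = k - rows := by
        rw [Nat.mod_eq_sub_div_mul, hd]; try omega
      simp only [List.getElem_append, List.length_append, List.length_map, List.length_reverse,
        List.length_range, List.getElem_map, List.getElem_reverse, List.getElem_range, hd, hm]
      split_ifs <;> (simp_all; try omega)
    · have hd : k / rows = 2 := by apply Nat.div_eq_of_lt_le <;> omega
      have hm : k % rows = k - 2 * rows := by
        rw [Nat.mod_eq_sub_div_mul, hd]; try omega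
      simp only [List.getElem_append, List.length_append, List.length_map, List.length_reverse,
        List.length_range, List.getElem_map, List.getElem_reverse, List.getElem_range, hd, hm]
      split_ifs <;> (simp_all; try omega)

-- once the index reaches n the guarded fold is a no-op: only the first n - index steps write
theorem pvGuard_elim (cs : List Char) (L : List (Nat × Nat)) (st : List (List String) × Nat)
    (hst : st.2 ≤ cs.length) :
    List.foldl (pvG cs) st L = List.foldl (pvH cs) st (L.take (cs.length - st.2)) := by
  induction L generalizing st with
  | nil => simp
  | cons p L ih =>
    by_cases h : st.2 < cs.length
    · have : cs.length - st.2 = (cs.length - (st.2 + 1)) + 1 := by omega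
      rw [this]
      simp only [List.foldl_cons, List.take_succ_cons]
      rw [show pvG cs st p = pvH cs st p from by simp [pvG, pvH, h]]
      exact ih (pvH cs st p) (by simp [pvH]; omega)
    · have h2 : cs.length - st.2 = 0 := by omega
      rw [h2]
      simp only [List.take_zero, List.foldl_nil, List.foldl_cons]
      rw [show pvG cs st p = st from by simp [pvG, h]]
      have := ih st hst
      rwa [h2, List.take_zero, List.foldl_nil] at this

-- threading the running index through the fold = pairing each cell with its index
theorem pvCounter_zipIdx (cs : List Char) (L : List (Nat × Nat)) (m : List (List String))
    (c : Nat) :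
    (List.foldl (pvH cs) (m, c) L).1
      = List.foldl
          (fun m (pk : (Nat × Nat) × Nat) =>
            pvSetCell m pk.1.1 pk.1.2 (String.ofList [cs.getD pk.2 ' ']))
          m (L.zipIdx c) := by
  induction L generalizing m c with
  | nil => simp
  | cons p L ih =>
    simpa [pvH] using ih (pvSetCell m p.1 p.2 (String.ofList [cs.getD c ' '])) (c + 1)

-- the first n cells of A's visiting order, indexed, are exactly B's arithmetic cells
theorem pvTake_zipIdx (rows n : Nat) (hn : n ≤ 3 * rows) :
    ((pvP rows).take n).zipIdx 0 = (List.range n).map (fun k => (pvSeq rows k, k)) := by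
  apply List.ext_getElem
  · simp [pvP_length rows]; omega
  · intro k h1 h2
    have hlen : k < n := by simpa [pvP_length rows] using h2
    have hk : k < (pvP rows).length := by rw [pvP_length]; omega
    simp [List.getElem_zipIdx, List.getElem_take, pvP_getElem rows k hk]

-- A's three column loops, flattened into one guarded fold over the visiting order pvP
theorem pvA_eq_foldP (s : String) :
    create_matrix_from_cipher s
      = (List.foldl (pvG s.toList)
          (List.replicate ((s.toList.length + 2) / 3) (List.replicate 3 ""), 0)
          (pvP ((s.toList.length + 2) / 3))).1 := by
  simp only [create_matrix_from_cipher, pvP, List.foldl_append, List.foldl_map,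
    List.foldl_cons, List.foldl_nil]
  norm_num [pvG]

-- B, written with pvSeq
theorem pvB_eq (s : String) :
    create_matrix_from_cipher_alt s
      = List.foldl
          (fun m k => pvSetCell m (pvSeq ((s.toList.length + 2) / 3) k).1
            (pvSeq ((s.toList.length + 2) / 3) k).2 (String.ofList [s.toList.getD k ' ']))
          (List.replicate ((s.toList.length + 2) / 3) (List.replicate 3 ""))
          (List.range s.toList.length) := by
  simp only [create_matrix_from_cipher_alt, pvSeq]

theorem create_matrix_from_cipher_eq (ciphertext : String) :
    create_matrix_from_cipher ciphertext = create_matrix_from_cipher_alt ciphertext := by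
  have hn : ciphertext.toList.length ≤ 3 * ((ciphertext.toList.length + 2) / 3) := by omega
  rw [pvA_eq_foldP, pvB_eq,
    pvGuard_elim _ _ _ (by simp), Nat.sub_zero,
    pvCounter_zipIdx, pvTake_zipIdx _ _ hn, List.foldl_map]

-- ===== VERDICT (by name: the statement is the Claim_ definition above) =====
theorem create_matrix_from_cipher_spec : Claim_equal_create_matrix_from_cipher := by
  intro ciphertext _
  exact create_matrix_from_cipher_eq ciphertext
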